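-- pv_equiv track=rewrite | github.com/Yeba/SmallProject | DiscreteR/DiscreteR.py | stringSet
-- ===== SOURCE A (Python) =====
-- def stringSet(m):
--     '''将m格式化成集合的字符串形式'''
--     re=""
--     count=0
--     for i in range(len(m)):
--         for j in range(len(m)):
--             if(m[i][j]):
--                 count+=1
--     for i in range(len(m)):
--         for j in range(len(m)):
--             if(m[i][j]):
--                 re=re+"<"+str(i+1)+","+str(j+1)+">"
--                 count-=1
--                 if(count>0):
--                     re=re+","
--     return re
-- ===== SOURCE B (Python) =====
-- def stringSet(m):
--     '''将m格式化成集合的字符串形式'''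
--     n = len(m)
--     parts = []
--     for i in range(n):
--         for j in range(n):
--             if m[i][j]:
--                 parts.append("<" + str(i + 1) + "," + str(j + 1) + ">")
--     return ",".join(parts)
-- ===== Notes on version B (the rewrite author's own statement) =====
-- stated objective: faster
-- what changed: Drops A's separate counting pass and its count-decrement separator logic: one pass collects the pair strings into a list and ','.join inserts the separators, avoiding A's repeated string concatenation.
import Mathlib
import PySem

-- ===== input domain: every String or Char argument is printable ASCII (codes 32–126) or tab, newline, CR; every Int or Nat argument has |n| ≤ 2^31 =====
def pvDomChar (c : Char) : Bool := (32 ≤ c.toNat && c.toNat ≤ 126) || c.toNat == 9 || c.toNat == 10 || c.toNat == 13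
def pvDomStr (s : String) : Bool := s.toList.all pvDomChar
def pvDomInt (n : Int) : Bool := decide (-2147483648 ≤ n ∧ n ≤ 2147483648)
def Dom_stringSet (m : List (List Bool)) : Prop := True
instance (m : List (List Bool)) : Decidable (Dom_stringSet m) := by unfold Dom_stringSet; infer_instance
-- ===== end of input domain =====

-- B drops A's counting pass and its count-decrement separator logic: one pass collects
-- the pair strings and ",".join inserts the separators, replacing A's quadratic repeated string concatenation (objective: faster; measured).

-- shared helpers: m[i][j] (rows at least len(m) long under Pre_) and the string "<i+1,j+1>"
def pvCell (m : List (List Bool)) (i j : Int) : Bool :=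
  PySem.List.pyGetD (PySem.List.pyGetD m i []) j false

def pvPart (i j : Int) : List Char :=
  ['<'] ++ PySem.Int.toChars (i + 1) ++ [','] ++ PySem.Int.toChars (j + 1) ++ ['>']

-- ===== PORT A =====
def stringSet (m : List (List Bool)) : String :=
  let r := PySem.List.pyRange 0 (PySem.List.len m) 1
  -- first pass: count the truthy cells
  let count : Int :=
    r.foldl (fun c i => r.foldl (fun c j => if pvCell m i j then c + 1 else c) c) 0
  -- second pass: append "<i+1,j+1>" and a "," while count stays positive
  let fin :=
    r.foldl (fun st i =>
      r.foldl (fun (st : List Char × Int) j =>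
        if pvCell m i j then
          let re := st.1 ++ pvPart i j
          let c := st.2 - 1
          (if c > 0 then re ++ [','] else re, c)
        else st) st) (([] : List Char), count)
  String.ofList fin.1

-- ===== PORT B =====
def stringSet_alt (m : List (List Bool)) : String :=
  let r := PySem.List.pyRange 0 (PySem.List.len m) 1
  let parts :=
    r.foldl (fun acc i =>
      r.foldl (fun (acc : List (List Char)) j =>
        if pvCell m i j then acc ++ [pvPart i j] else acc) acc) []
  String.ofList (PySem.Chars.join [','] parts)

-- ===== PRECONDITION & SPEC =====
-- Pre_ excludes ragged matrices with a row shorter than len(m): there the Python A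
-- (and B alike) raises IndexError on m[i][j].
def Pre_stringSet (m : List (List Bool)) : Prop :=
  ∀ row ∈ m, m.length ≤ row.length
instance (m : List (List Bool)) : Decidable (Pre_stringSet m) := by
  unfold Pre_stringSet; infer_instance

def pvWitness_stringSet : List (List Bool) := [[true, false], [false, true]]

def Spec_stringSet (m : List (List Bool)) (out : String) : Prop := out = stringSet_alt m
instance (m : List (List Bool)) (out : String) : Decidable (Spec_stringSet m out) := by
  unfold Spec_stringSet; infer_instance

-- ===== CLAIM (what is proved, stated in full; the proofs are below) =====
def Claim_equal_stringSet : Prop :=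
  ∀ (m : List (List Bool)), Dom_stringSet m → Pre_stringSet m → Spec_stringSet m (stringSet m)

-- ===== LEMMAS AND PROOFS =====

-- a conditional fold over l is a fold over the filtered-and-mapped list
theorem pvFoldlIfFilterMap {α β σ : Type} (p : α → Bool) (f : α → β) (g : σ → β → σ)
    (l : List α) (st : σ) :
    l.foldl (fun st x => if p x then g st (f x) else st) st
      = ((l.filter p).map f).foldl g st := by
  induction l generalizing st with
  | nil => rfl
  | cons a l ih =>
    by_cases h : p a = true <;> simp [h, ih]

-- folding segment by segment is folding over the flattened list
theorem pvFoldlFlatMap {α β σ : Type} (g : σ → β → σ) (Q : α → List β)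
    (l : List α) (st : σ) :
    l.foldl (fun st i => (Q i).foldl g st) st = (l.flatMap Q).foldl g st := by
  rw [List.flatMap_def, List.foldl_flatten, List.foldl_map]

-- A's separator loop, started with the exact count, produces the ","-join
theorem pvJoinFold (L : List (List Char)) (acc : List Char) :
    L.foldl (fun (st : List Char × Int) s =>
        let re := st.1 ++ s
        let c := st.2 - 1
        (if c > 0 then re ++ [','] else re, c)) (acc, (L.length : Int))
      = (acc ++ PySem.Chars.join [','] L, 0) := by
  induction L generalizing acc with
  | nil => simp [PySem.Chars.join_nil]
  | cons s L ih =>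
    cases L with
    | nil => simp [PySem.Chars.join_singleton]
    | cons t rest =>
      have hc : ((s :: t :: rest).length : Int) - 1 = ((t :: rest).length : Int) := by
        push_cast [List.length_cons]; ring
      have hpos : (0 : Int) < ((t :: rest).length : Int) := by
        push_cast [List.length_cons]; omega
      rw [List.foldl_cons]
      show List.foldl _
          (if ((s :: t :: rest).length : Int) - 1 > 0
            then acc ++ s ++ [','] else acc ++ s, ((s :: t :: rest).length : Int) - 1)
          (t :: rest) = _
      rw [hc, if_pos hpos, PySem.Chars.join_cons_cons]
      have := ih (acc ++ s ++ [','])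
      simp only [List.append_assoc] at this ⊢
      exact this

-- ===== VERDICT (by name: the statement is the Claim_ definition above) =====
theorem stringSet_spec : Claim_equal_stringSet := by
  intro m _ _
  unfold Spec_stringSet stringSet stringSet_alt
  set r := PySem.List.pyRange 0 (PySem.List.len m) 1 with hr
  -- the row-major list of pair strings of the truthy cells
  set P := r.flatMap (fun i => (r.filter (pvCell m i)).map (pvPart i)) with hP
  -- B's parts list is P
  have hB : r.foldl (fun acc i =>
      r.foldl (fun (acc : List (List Char)) j =>
        if pvCell m i j then acc ++ [pvPart i j] else acc) acc) [] = P := by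
    simp only [PySem.List.foldl_append_if]
    rw [PySem.List.foldl_append_eq_flatMap
      (fun i => (r.filter (pvCell m i)).map (pvPart i)) r []]
    simp [hP]
  -- A's count is P's length
  have hcount : r.foldl (fun c i =>
      r.foldl (fun c j => if pvCell m i j then c + 1 else c) c) 0 = (P.length : Int) := by
    simp only [PySem.List.foldl_count_if]
    rw [PySem.List.foldl_add r (fun i => ((r.countP (pvCell m i) : Int))) 0]
    simp [hP, List.length_flatMap, Function.comp_def, List.countP_eq_length_filter]
  -- A's second nested loop is the fold of the separator step over P
  have hA : r.foldl (fun st i =>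
      r.foldl (fun (st : List Char × Int) j =>
        if pvCell m i j then
          let re := st.1 ++ pvPart i j
          let c := st.2 - 1
          (if c > 0 then re ++ [','] else re, c)
        else st) st) (([] : List Char), (P.length : Int))
      = (PySem.Chars.join [','] P, 0) := by
    have hinner : ∀ (i : Int) (st : List Char × Int),
        r.foldl (fun (st : List Char × Int) j =>
          if pvCell m i j then
            (if st.2 - 1 > 0 then st.1 ++ pvPart i j ++ [','] else st.1 ++ pvPart i j,
              st.2 - 1)
          else st) st
        = ((r.filter (pvCell m i)).map (pvPart i)).foldl
            (fun (st : List Char × Int) s =>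
              (if st.2 - 1 > 0 then st.1 ++ s ++ [','] else st.1 ++ s, st.2 - 1)) st :=
      fun i st => pvFoldlIfFilterMap (pvCell m i) (pvPart i)
        (fun (st : List Char × Int) s =>
          (if st.2 - 1 > 0 then st.1 ++ s ++ [','] else st.1 ++ s, st.2 - 1)) r st
    simp only [hinner]
    rw [pvFoldlFlatMap, ← hP]
    exact pvJoinFold P []
  simp only [hcount, hA, hB]
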